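-- pv_equiv track=rewrite | github.com/paulgamble3/multi-engine-mentoring | Engine_Mentoring.py | process_conv
-- ===== SOURCE A (Python) =====
-- def process_conv(conv):
--     conv = conv.split("[/INST]")
--     conv = [c.split("[INST]") for c in conv]
--     conv = [item for sublist in conv for item in sublist]
--
--     conv_string = "\n\n".join(conv)
--     conv_string = conv_string.replace("Patient:", "\n\nPatient:")
--     conv_string = conv_string.replace("Nurse:", "\n\nNurse:")
--     conv_string = conv_string.replace("[T", "\n\n**[T")
--     conv_string = conv_string.replace("]", "]**")
--
--     return conv_string
-- ===== SOURCE B (Python) =====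
-- def process_conv(conv):
--     conv_string = conv.replace("[/INST]", "\n\n").replace("[INST]", "\n\n")
--     conv_string = conv_string.replace("Patient:", "\n\nPatient:")
--     conv_string = conv_string.replace("Nurse:", "\n\nNurse:")
--     conv_string = conv_string.replace("[T", "\n\n**[T")
--     conv_string = conv_string.replace("]", "]**")
--     return conv_string
-- ===== Notes on version B (the rewrite author's own statement) =====
-- stated objective: simpler
-- what changed: Replaced the two-level split / list-comprehension flatten / join pipeline with two direct string replacements of the [/INST] and [INST] delimiters by a blank line, so B is a flat chain of substitutions that never builds an intermediate list of substrings.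
import Mathlib
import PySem

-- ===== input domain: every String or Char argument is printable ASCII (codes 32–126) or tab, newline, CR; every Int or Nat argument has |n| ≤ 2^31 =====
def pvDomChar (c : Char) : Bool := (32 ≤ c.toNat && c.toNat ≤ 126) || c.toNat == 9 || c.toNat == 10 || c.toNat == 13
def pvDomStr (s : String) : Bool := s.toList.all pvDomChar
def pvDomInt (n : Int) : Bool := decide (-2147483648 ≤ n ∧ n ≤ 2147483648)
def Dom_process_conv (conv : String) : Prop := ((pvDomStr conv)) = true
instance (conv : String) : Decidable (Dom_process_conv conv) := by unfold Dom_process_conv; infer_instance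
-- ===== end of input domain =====

-- B replaces A's split / list-comprehension flatten / join pipeline by two direct
-- delimiter substitutions, giving a flat chain of replaces (objective: simpler).

-- ===== PORT A =====
-- A: split on "[/INST]", split each piece on "[INST]", flatten, join with "\n\n",
-- then four replaces.  The split separators are nonempty literals, so
-- PySem.Chars.splitOn is exact here.
def process_conv (conv : String) : String :=
  let conv1 := PySem.Chars.splitOn conv.toList "[/INST]".toList
  let conv2 := conv1.map (fun c => PySem.Chars.splitOn c "[INST]".toList)
  let conv3 := conv2.flatten
  let s0 := PySem.Chars.join "\n\n".toList conv3
  let s1 := PySem.Chars.replace s0 "Patient:".toList "\n\nPatient:".toList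
  let s2 := PySem.Chars.replace s1 "Nurse:".toList "\n\nNurse:".toList
  let s3 := PySem.Chars.replace s2 "[T".toList "\n\n**[T".toList
  let s4 := PySem.Chars.replace s3 "]".toList "]**".toList
  String.ofList s4

-- ===== PORT B =====
-- B: a flat chain of six replaces, no intermediate list of substrings.
def process_conv_alt (conv : String) : String :=
  let c1 := PySem.Chars.replace
              (PySem.Chars.replace conv.toList "[/INST]".toList "\n\n".toList)
              "[INST]".toList "\n\n".toList
  let c2 := PySem.Chars.replace c1 "Patient:".toList "\n\nPatient:".toList
  let c3 := PySem.Chars.replace c2 "Nurse:".toList "\n\nNurse:".toList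
  let c4 := PySem.Chars.replace c3 "[T".toList "\n\n**[T".toList
  String.ofList (PySem.Chars.replace c4 "]".toList "]**".toList)

-- ===== PRECONDITION & SPEC =====
def Spec_process_conv (conv : String) (out : String) : Prop := out = process_conv_alt conv
instance (conv : String) (out : String) : Decidable (Spec_process_conv conv out) := by unfold Spec_process_conv; infer_instance

-- ===== CLAIM (what is proved, stated in full; the proofs are below) =====
def Claim_equal_process_conv : Prop := ∀ (conv : String), Dom_process_conv conv → Spec_process_conv conv (process_conv conv)

-- ===== LEMMAS AND PROOFS =====

def replR (old new : List Char) : List Char → List Char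
  | [] => []
  | c :: t =>
    if old.isPrefixOf (c :: t) then new ++ replR old new (List.drop (old.length - 1) t)
    else c :: replR old new t
termination_by l => l.length
decreasing_by
  · simp only [List.length_drop, List.length_cons]; omega
  · simp

def splitR (sep : List Char) : List Char → List (List Char)
  | [] => [[]]
  | c :: t =>
    if sep.isPrefixOf (c :: t) then [] :: splitR sep (List.drop (sep.length - 1) t)
    else (splitR sep t).modifyHead (c :: ·)
termination_by l => l.length
decreasing_by
  · simp only [List.length_drop, List.length_cons]; omega
  · simp

theorem drop_len_cons (old : List Char) (ho : old ≠ []) (c : Char) (t : List Char) :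
    List.drop old.length (c :: t) = List.drop (old.length - 1) t := by
  cases old with
  | nil => simp_all
  | cons o os => simp

theorem replace_go_eq (old new : List Char) (ho : old ≠ []) :
    ∀ fuel l acc, l.length ≤ fuel →
      PySem.Chars.replace.go old new fuel l acc = acc.reverse ++ replR old new l := by
  intro fuel
  induction fuel with
  | zero =>
    intro l acc h
    have hl : l = [] := by cases l <;> simp_all
    subst hl
    simp [PySem.Chars.replace.go, replR]
  | succ n ih =>
    intro l acc h
    cases l with
    | nil => simp [PySem.Chars.replace.go, replR]
    | cons c t =>
      rw [PySem.Chars.replace.go]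
      by_cases hp : old.isPrefixOf (c :: t)
      · simp only [hp, if_true]
        have hol : 0 < old.length := List.length_pos_of_ne_nil ho
        rw [drop_len_cons old ho, ih (List.drop (old.length - 1) t) (new.reverse ++ acc) (by simp only [List.length_drop, List.length_cons] at h ⊢; omega)]
        conv_rhs => rw [replR]
        simp [hp]
      · simp only [hp, if_false]
        rw [ih t (c :: acc) (by simp only [List.length_cons] at h; omega)]
        conv_rhs => rw [replR]
        simp [hp]

theorem replace_eq_replR (s old new : List Char) (ho : old ≠ []) :
    PySem.Chars.replace s old new = replR old new s := by
  rw [PySem.Chars.replace]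
  simp [List.isEmpty_iff, ho, replace_go_eq old new ho s.length s []]

theorem splitR_ne_nil (sep l : List Char) : splitR sep l ≠ [] := by
  fun_induction splitR sep l with
  | case1 => simp
  | case2 _ _ _ _ => simp
  | case3 c t hp ih => rcases h : splitR sep t with _ | ⟨p, ps⟩
                       · exact absurd h ih
                       · simp [h]

theorem splitOn_go_eq (sep : List Char) (hs : sep ≠ []) :
    ∀ fuel l cur acc, l.length ≤ fuel →
      PySem.Chars.splitOn.go sep fuel l cur acc
        = acc.reverse ++ (splitR sep l).modifyHead (cur.reverse ++ ·) := by
  intro fuel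
  induction fuel with
  | zero =>
    intro l cur acc h
    have hl : l = [] := by cases l <;> simp_all
    subst hl
    simp [PySem.Chars.splitOn.go, splitR]
  | succ n ih =>
    intro l cur acc h
    cases l with
    | nil => simp [PySem.Chars.splitOn.go, splitR]
    | cons c t =>
      rw [PySem.Chars.splitOn.go]
      by_cases hp : sep.isPrefixOf (c :: t)
      · have hol : 0 < sep.length := List.length_pos_of_ne_nil hs
        simp only [hp, if_true]
        rw [drop_len_cons sep hs,
          ih (List.drop (sep.length - 1) t) [] (cur.reverse :: acc)
            (by simp only [List.length_drop, List.length_cons] at h ⊢; omega)]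
        conv_rhs => rw [splitR]
        simp only [hp, if_true, List.reverse_cons, List.reverse_nil, List.nil_append,
          List.modifyHead_cons, List.append_assoc, List.singleton_append]
        rw [show (fun (x : List Char) => x) = id from rfl, List.modifyHead_id]
        simp
      · simp only [hp, if_false]
        rw [ih t (c :: cur) acc (by simp only [List.length_cons] at h; omega)]
        conv_rhs => rw [splitR]
        simp only [hp, if_false]
        rcases hsp : splitR sep t with _ | ⟨p, ps⟩
        · exact absurd hsp (splitR_ne_nil sep t)
        · simp

theorem splitOn_eq_splitR (s sep : List Char) (hs : sep ≠ []) :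
    PySem.Chars.splitOn s sep = splitR sep s := by
  rw [PySem.Chars.splitOn, splitOn_go_eq sep hs (s.length + 1) s [] [] (by omega)]
  rcases h : splitR sep s with _ | ⟨p, ps⟩
  · exact absurd h (splitR_ne_nil sep s)
  · simp

theorem join_cons_ne_nil (new p : List Char) (rest : List (List Char)) (h : rest ≠ []) :
    PySem.Chars.join new (p :: rest) = p ++ new ++ PySem.Chars.join new rest := by
  rcases rest with _ | ⟨q, rs⟩
  · exact absurd rfl h
  · rw [PySem.Chars.join_cons_cons]

theorem join_modifyHead_cons (new : List Char) (c : Char) (X : List (List Char)) (h : X ≠ []) :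
    PySem.Chars.join new (X.modifyHead (c :: ·)) = c :: PySem.Chars.join new X := by
  rcases X with _ | ⟨p, ps⟩
  · exact absurd rfl h
  · rcases ps with _ | ⟨q, qs⟩
    · simp [PySem.Chars.join, List.intercalate]
    · simp only [List.modifyHead_cons]
      rw [PySem.Chars.join_cons_cons, PySem.Chars.join_cons_cons]
      simp

theorem join_splitR (old new l : List Char) (ho : old ≠ []) :
    PySem.Chars.join new (splitR old l) = replR old new l := by
  fun_induction splitR old l with
  | case1 => simp [replR, PySem.Chars.join, List.intercalate]
  | case2 c t hp ih =>
    rw [join_cons_ne_nil new [] _ (splitR_ne_nil _ _), ih]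
    conv_rhs => rw [replR]
    simp [hp]
  | case3 c t hp ih =>
    rw [join_modifyHead_cons new c _ (splitR_ne_nil _ _), ih]
    conv_rhs => rw [replR]
    simp [hp]

theorem not_isPrefixOf_of_head_notin (b : List Char) (c : Char) (x : List Char)
    (hb : b ≠ []) (hc : c ∉ b) : b.isPrefixOf (c :: x) = false := by
  rcases b with _ | ⟨h, bs⟩
  · exact absurd rfl hb
  · rw [← Bool.not_eq_true, List.isPrefixOf_iff_prefix, List.cons_prefix_cons]
    rintro ⟨rfl, -⟩
    simp at hc

theorem replR_prefix_notin (b w pre v : List Char) (hb : b ≠ [])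
    (hpre : ∀ c ∈ pre, c ∉ b) :
    replR b w (pre ++ v) = pre ++ replR b w v := by
  induction pre with
  | nil => simp
  | cons c pre' ih =>
    rw [List.cons_append, replR,
      not_isPrefixOf_of_head_notin b c _ hb (hpre c (by simp))]
    simp only [Bool.false_eq_true, if_false]
    rw [ih (fun d hd => hpre d (by simp [hd]))]
    simp

theorem prefix_cut (b u r : List Char) (hn : '\n' ∉ b)
    (h : b.isPrefixOf (u ++ '\n' :: r) = true) : b.isPrefixOf u = true := by
  rw [List.isPrefixOf_iff_prefix] at h ⊢
  have hble : b.length ≤ u.length := by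
    by_contra hgt
    push_neg at hgt
    have hb : b = List.take b.length (u ++ '\n' :: r) := List.prefix_iff_eq_take.mp h
    rw [List.take_append] at hb
    have : '\n' ∈ b := by
      rw [hb]
      refine List.mem_append_right _ ?_
      rcases hk : b.length - u.length with _ | k
      · omega
      · simp
    exact hn this
  have hb : b = List.take b.length (u ++ '\n' :: r) := List.prefix_iff_eq_take.mp h
  rw [List.take_append_of_le_length hble] at hb
  rw [List.prefix_iff_eq_take]
  exact hb

theorem replR_sep (b w u v : List Char) (hb : b ≠ []) (hn : '\n' ∉ b) :
    replR b w (u ++ '\n' :: '\n' :: v) = replR b w u ++ '\n' :: '\n' :: replR b w v := by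
  generalize hlen : u.length = n
  induction n using Nat.strong_induction_on generalizing u with
  | _ n ih =>
    rcases u with _ | ⟨c, u'⟩
    · have := replR_prefix_notin b w ['\n', '\n'] v hb
        (by intro d hd; simp at hd; subst hd; exact hn)
      simpa [replR] using this
    · by_cases hp : b.isPrefixOf (c :: u')
      · have hp2 : b.isPrefixOf (c :: (u' ++ '\n' :: '\n' :: v)) = true := by
          rw [List.isPrefixOf_iff_prefix] at hp ⊢
          exact hp.trans (by simpa using List.prefix_append (c :: u') ('\n' :: '\n' :: v))
        have hble : b.length ≤ u'.length + 1 := by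
          have := (List.isPrefixOf_iff_prefix.mp hp).length_le
          simpa using this
        rw [List.cons_append, replR]
        simp only [hp2, if_true]
        rw [replR]
        simp only [hp, if_true]
        have hdrop : List.drop (b.length - 1) (u' ++ '\n' :: '\n' :: v)
            = List.drop (b.length - 1) u' ++ '\n' :: '\n' :: v :=
          List.drop_append_of_le_length (by omega)
        rw [hdrop, ih ((List.drop (b.length - 1) u').length)
          (by simp only [List.length_drop, List.length_cons] at hlen ⊢; omega) _ rfl]
        simp
      · have hp2 : b.isPrefixOf (c :: (u' ++ '\n' :: '\n' :: v)) = false := by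
          by_contra hcon
          simp only [Bool.not_eq_false] at hcon
          exact hp (prefix_cut b (c :: u') ('\n' :: v) hn (by simpa using hcon))
        rw [List.cons_append, replR]
        simp only [hp2, Bool.false_eq_true, if_false]
        rw [replR]
        simp only [hp, Bool.false_eq_true, if_false]
        rw [ih u'.length (by simp only [List.length_cons] at hlen; omega) u' rfl]
        simp

theorem replR_join (b w : List Char) (ps : List (List Char)) (hb : b ≠ []) (hn : '\n' ∉ b) :
    replR b w (PySem.Chars.join ['\n', '\n'] ps)
      = PySem.Chars.join ['\n', '\n'] (ps.map (replR b w)) := by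
  induction ps with
  | nil => simp [PySem.Chars.join, List.intercalate, replR]
  | cons p rest ih =>
    rcases rest with _ | ⟨q, rs⟩
    · simp [PySem.Chars.join, List.intercalate]
    · rw [join_cons_ne_nil _ p _ (by simp)]
      rw [show (p ++ ['\n', '\n']) ++ PySem.Chars.join ['\n', '\n'] (q :: rs)
            = p ++ '\n' :: '\n' :: PySem.Chars.join ['\n', '\n'] (q :: rs) by simp]
      rw [replR_sep b w p _ hb hn, ih]
      rw [show List.map (replR b w) (p :: q :: rs)
            = replR b w p :: replR b w q :: List.map (replR b w) rs from rfl,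
        join_cons_ne_nil ['\n', '\n'] (replR b w p) (replR b w q :: List.map (replR b w) rs) (by simp)]
      simp

theorem join_append (sep : List Char) (l m : List (List Char)) (hl : l ≠ []) (hm : m ≠ []) :
    PySem.Chars.join sep (l ++ m) = PySem.Chars.join sep l ++ sep ++ PySem.Chars.join sep m := by
  induction l with
  | nil => exact absurd rfl hl
  | cons p l' ih =>
    rcases l' with _ | ⟨p', l''⟩
    · rw [List.cons_append, List.nil_append, join_cons_ne_nil sep p m hm]
      simp [PySem.Chars.join, List.intercalate]
    · rw [List.cons_append, join_cons_ne_nil sep p _ (by simp), ih (by simp),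
        join_cons_ne_nil sep p (p' :: l'') (by simp)]
      simp

theorem join_flatten (sep : List Char) (xss : List (List (List Char)))
    (h : ∀ l ∈ xss, l ≠ []) :
    PySem.Chars.join sep xss.flatten = PySem.Chars.join sep (xss.map (PySem.Chars.join sep)) := by
  induction xss with
  | nil => simp
  | cons l rest ih =>
    rcases rest with _ | ⟨m, rs⟩
    · simp [PySem.Chars.join, List.intercalate]
    · have hm : m ≠ [] := h m (by simp)
      have hflat : (m :: rs).flatten ≠ [] := by
        rcases m with _ | _
        · exact absurd rfl hm
        · simp
      rw [List.flatten_cons, join_append sep l _ (h l (by simp)) hflat,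
        ih (fun x hx => h x (by simp [hx])),
        show List.map (PySem.Chars.join sep) (l :: m :: rs)
          = PySem.Chars.join sep l :: PySem.Chars.join sep m :: List.map (PySem.Chars.join sep) rs from rfl,
        join_cons_ne_nil sep (PySem.Chars.join sep l)
          (PySem.Chars.join sep m :: List.map (PySem.Chars.join sep) rs) (by simp)]
      simp

theorem key_eq (s : List Char) :
    PySem.Chars.join "\n\n".toList
      (((PySem.Chars.splitOn s "[/INST]".toList).map
        (fun c => PySem.Chars.splitOn c "[INST]".toList)).flatten)
      = PySem.Chars.replace (PySem.Chars.replace s "[/INST]".toList "\n\n".toList)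
          "[INST]".toList "\n\n".toList := by
  have ha : "[/INST]".toList ≠ [] := by decide
  have hbne : "[INST]".toList ≠ [] := by decide
  have hnn : "\n\n".toList = ['\n', '\n'] := by decide
  rw [replace_eq_replR _ _ _ ha, replace_eq_replR _ _ _ hbne, splitOn_eq_splitR _ _ ha]
  rw [List.map_congr_left (fun c (_ : c ∈ splitR "[/INST]".toList s) =>
    splitOn_eq_splitR c "[INST]".toList hbne)]
  rw [hnn, join_flatten _ _ (by
    intro l hl
    rcases List.mem_map.mp hl with ⟨c, _, rfl⟩
    exact splitR_ne_nil _ _)]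
  rw [List.map_map]
  have hm2 : List.map (PySem.Chars.join ['\n', '\n'] ∘ fun c => splitR "[INST]".toList c)
      (splitR "[/INST]".toList s)
      = List.map (replR "[INST]".toList ['\n', '\n']) (splitR "[/INST]".toList s) :=
    List.map_congr_left (fun c _ => join_splitR "[INST]".toList ['\n', '\n'] c hbne)
  rw [hm2, ← replR_join _ _ _ hbne (by decide), join_splitR _ _ _ ha]

-- ===== VERDICT (by name: the statement is the Claim_ definition above) =====
theorem process_conv_spec : Claim_equal_process_conv := by
  intro conv _
  simp only [Spec_process_conv, process_conv, process_conv_alt]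
  rw [key_eq conv.toList]
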